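-- pv_equiv track=rewrite | github.com/kotaro-kinoshita/yomitoku | src/yomitoku/table_semantic_parser.py | _calc_spans_and_indices_from_raw_grid
-- ===== SOURCE A (Python) =====
-- def _calc_spans_and_indices_from_raw_grid(raw_data):
--     """
--     raw_data: NxM の node_id 行列（欠損は None）
--     return:
--       info: {
--         cell_id: {
--           "row": int, "col": int,          # 0-start 左上（アンカー）
--           "row_span": int, "col_span": int
--         }
--       }
--     """
--     pos = {}
--     for r, row in enumerate(raw_data):
--         for c, cell_id in enumerate(row):
--             if cell_id is None:
--                 continue
--             if cell_id not in pos: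
--                 pos[cell_id] = [r, r, c, c]  # rmin,rmax,cmin,cmax
--             else:
--                 pos[cell_id][0] = min(pos[cell_id][0], r)
--                 pos[cell_id][1] = max(pos[cell_id][1], r)
--                 pos[cell_id][2] = min(pos[cell_id][2], c)
--                 pos[cell_id][3] = max(pos[cell_id][3], c)
--
--     info = {}
--     for cell_id, (rmin, rmax, cmin, cmax) in pos.items():
--         info[cell_id] = {
--             "row": rmin,  # 0-start
--             "col": cmin,  # 0-start
--             "row_span": (rmax - rmin + 1),
--             "col_span": (cmax - cmin + 1),
--         }
--
--     return info
-- ===== SOURCE B (Python) =====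
-- def _calc_spans_and_indices_from_raw_grid(raw_data):
--     # Collect the full lists of row/col positions per cell_id (first-appearance
--     # order), then reduce each with min/max in one dict comprehension.
--     positions = {}
--     for r, row in enumerate(raw_data):
--         for c, cell_id in enumerate(row):
--             if cell_id is not None:
--                 rows, cols = positions.setdefault(cell_id, ([], []))
--                 rows.append(r)
--                 cols.append(c)
--     return {
--         cell_id: {
--             "row": min(rows),
--             "col": min(cols),
--             "row_span": max(rows) - min(rows) + 1,
--             "col_span": max(cols) - min(cols) + 1,
--         }
--         for cell_id, (rows, cols) in positions.items()
--     }
-- ===== Notes on version B (the rewrite author's own statement) =====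
-- stated objective: alternative
-- what changed: Instead of maintaining running rmin/rmax/cmin/cmax per cell during the scan, B accumulates the full lists of (row, col) positions per cell_id (via setdefault, preserving first-appearance order) and reduces them with min/max only at the end in a dict comprehension.
import Mathlib
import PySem

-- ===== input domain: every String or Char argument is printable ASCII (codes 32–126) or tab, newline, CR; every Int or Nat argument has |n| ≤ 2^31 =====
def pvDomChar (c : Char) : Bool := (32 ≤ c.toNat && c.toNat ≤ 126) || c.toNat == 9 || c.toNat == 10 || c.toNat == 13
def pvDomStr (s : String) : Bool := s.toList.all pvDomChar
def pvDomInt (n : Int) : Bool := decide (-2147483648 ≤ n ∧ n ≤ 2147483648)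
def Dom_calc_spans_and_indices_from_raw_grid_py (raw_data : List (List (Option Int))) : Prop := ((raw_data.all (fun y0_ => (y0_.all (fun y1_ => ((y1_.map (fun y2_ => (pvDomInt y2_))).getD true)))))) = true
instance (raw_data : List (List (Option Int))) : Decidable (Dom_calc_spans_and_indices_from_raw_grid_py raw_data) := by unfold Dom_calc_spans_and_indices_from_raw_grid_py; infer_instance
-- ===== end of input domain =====

-- B maintains full per-cell position lists reduced with min/max at the end, instead of
-- A's running rmin/rmax/cmin/cmax updates during the scan (alternative decomposition, same cost).

-- ===== PORT A =====
-- Python's 4-element list [rmin, rmax, cmin, cmax] is ported as a 4-tuple; the four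
-- independent in-place component assignments become one value update of the tuple.
def pvStepA (pos : PySem.Dict Int (Int × Int × Int × Int)) (r c cid : Int) :
    PySem.Dict Int (Int × Int × Int × Int) :=
  if pos.contains cid = false then pos.insert cid (r, r, c, c)
  else pos.modify cid (0, 0, 0, 0)
    (fun v => (min v.1 r, max v.2.1 r, min v.2.2.1 c, max v.2.2.2 c))

def calc_spans_and_indices_from_raw_grid_py (raw_data : List (List (Option Int))) :
    List (Int × List (String × Int)) :=
  let pos : PySem.Dict Int (Int × Int × Int × Int) :=
    (PySem.List.enumerate raw_data 0).foldl (fun pos rc =>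
      (PySem.List.enumerate rc.2 0).foldl (fun pos cc =>
        match cc.2 with
        | none => pos
        | some cid => pvStepA pos rc.1 cc.1 cid) pos) PySem.Dict.empty
  let info : PySem.Dict Int (List (String × Int)) :=
    pos.items.foldl (fun info p =>
      info.insert p.1 [("row", p.2.1), ("col", p.2.2.2.1),
                       ("row_span", p.2.2.1 - p.2.1 + 1),
                       ("col_span", p.2.2.2.2 - p.2.2.2.1 + 1)]) PySem.Dict.empty
  info.items

-- ===== PORT B =====
-- min(l) / max(l) of Source B on the always-nonempty position lists (the .getD 0 default is never used)
def pvMin (l : List Int) : Int := (PySem.List.min? l (fun y => y)).getD 0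
def pvMax (l : List Int) : Int := (PySem.List.max? l (fun y => y)).getD 0

def calc_spans_and_indices_from_raw_grid_py_alt (raw_data : List (List (Option Int))) :
    List (Int × List (String × Int)) :=
  let positions : PySem.Dict Int (List Int × List Int) :=
    (PySem.List.enumerate raw_data 0).foldl (fun d rc =>
      (PySem.List.enumerate rc.2 0).foldl (fun d cc =>
        match cc.2 with
        | none => d
        | some cid =>
          -- rows, cols = positions.setdefault(cid, ([], [])); rows.append(r); cols.append(c)
          d.modify cid ([], []) (fun p => (p.1 ++ [rc.1], p.2 ++ [cc.1]))) d) PySem.Dict.empty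
  positions.items.map (fun p =>
    (p.1, [("row", pvMin p.2.1), ("col", pvMin p.2.2),
           ("row_span", pvMax p.2.1 - pvMin p.2.1 + 1),
           ("col_span", pvMax p.2.2 - pvMin p.2.2 + 1)]))

-- ===== PRECONDITION & SPEC =====
def Spec_calc_spans_and_indices_from_raw_grid_py (raw_data : List (List (Option Int))) (out : List (Int × List (String × Int))) : Prop := out = calc_spans_and_indices_from_raw_grid_py_alt raw_data
instance (raw_data : List (List (Option Int))) (out : List (Int × List (String × Int))) : Decidable (Spec_calc_spans_and_indices_from_raw_grid_py raw_data out) := by unfold Spec_calc_spans_and_indices_from_raw_grid_py; infer_instance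

-- ===== CLAIM (what is proved, stated in full; the proofs are below) =====
def Claim_equal_calc_spans_and_indices_from_raw_grid_py : Prop := ∀ (raw_data : List (List (Option Int))), Dom_calc_spans_and_indices_from_raw_grid_py raw_data → Spec_calc_spans_and_indices_from_raw_grid_py raw_data (calc_spans_and_indices_from_raw_grid_py raw_data)

-- ===== LEMMAS AND PROOFS =====

-- B's per-cell step
def pvStepB (d : PySem.Dict Int (List Int × List Int)) (r c cid : Int) :
    PySem.Dict Int (List Int × List Int) :=
  d.modify cid ([], []) (fun p => (p.1 ++ [r], p.2 ++ [c]))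

-- the value abstraction: a position-list pair reduced to (rmin, rmax, cmin, cmax)
def pvG (p : Int × (List Int × List Int)) : Int × (Int × Int × Int × Int) :=
  (p.1, (pvMin p.2.1, pvMax p.2.1, pvMin p.2.2, pvMax p.2.2))

-- the invariant relating A's and B's dict states
def pvInv (dA : PySem.Dict Int (Int × Int × Int × Int))
    (dB : PySem.Dict Int (List Int × List Int)) : Prop :=
  dA.items = dB.items.map pvG ∧
  (∀ p ∈ dB.items, p.2.1 ≠ [] ∧ p.2.2 ≠ []) ∧
  (dB.items.map (·.1)).Nodup

theorem pvMin_append (l : List Int) (h : l ≠ []) (r : Int) :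
    pvMin (l ++ [r]) = min (pvMin l) r := by
  cases l with
  | nil => exact absurd rfl h
  | cons x t =>
    simp [pvMin, List.cons_append, PySem.List.min?_id_cons, List.foldl_append]

theorem pvMax_append (l : List Int) (h : l ≠ []) (r : Int) :
    pvMax (l ++ [r]) = max (pvMax l) r := by
  cases l with
  | nil => exact absurd rfl h
  | cons x t =>
    simp [pvMax, List.cons_append, PySem.List.max?_id_cons, List.foldl_append]

theorem pvMin_single (r : Int) : pvMin [r] = r := by
  simp [pvMin, PySem.List.min?_id_cons]

theorem pvMax_single (r : Int) : pvMax [r] = r := by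
  simp [pvMax, PySem.List.max?_id_cons]

theorem pvContains_eq (dA : PySem.Dict Int (Int × Int × Int × Int))
    (dB : PySem.Dict Int (List Int × List Int)) (cid : Int)
    (hmap : dA.items = dB.items.map pvG) : dA.contains cid = dB.contains cid := by
  simp [PySem.Dict.contains, hmap, List.any_map, Function.comp_def, pvG]

theorem pvStep_inv (dA : PySem.Dict Int (Int × Int × Int × Int))
    (dB : PySem.Dict Int (List Int × List Int)) (r c cid : Int)
    (h : pvInv dA dB) : pvInv (pvStepA dA r c cid) (pvStepB dB r c cid) := by
  obtain ⟨hmap, hne, hnd⟩ := h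
  have hcont := pvContains_eq dA dB cid hmap
  by_cases hb : dB.contains cid = true
  · -- existing key: both sides replace the entry in place
    have hfind : ∃ q, dB.items.find? (fun p => p.1 == cid) = some q := by
      rw [Option.isSome_iff_exists.symm, List.find?_isSome]
      simpa [PySem.Dict.contains, List.any_eq_true] using hb
    obtain ⟨q, hq⟩ := hfind
    have hqmem : q ∈ dB.items := List.mem_of_find?_eq_some hq
    have hq1 : q.1 = cid := by have := List.find?_some hq; simpa using this
    obtain ⟨hr0, hc0⟩ := hne q hqmem
    have getDB : dB.getD cid ([], []) = q.2 := by
      simp [PySem.Dict.getD, PySem.Dict.get?, hq]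
    have getDA : dA.getD cid (0, 0, 0, 0) = (pvG q).2 := by
      have : dA.items.find? (fun p => p.1 == cid) = some (pvG q) := by
        rw [hmap, List.find?_map]
        have : ((fun p : Int × (Int × Int × Int × Int) => p.1 == cid) ∘ pvG)
            = (fun p : Int × (List Int × List Int) => p.1 == cid) := rfl
        rw [this, hq]; rfl
      simp [PySem.Dict.getD, PySem.Dict.get?, this]
    have hgv : pvG (cid, (q.2.1 ++ [r], q.2.2 ++ [c]))
        = (cid, (min (pvG q).2.1 r, max (pvG q).2.2.1 r,
                 min (pvG q).2.2.2.1 c, max (pvG q).2.2.2.2 c)) := by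
      simp [pvG, pvMin_append _ hr0, pvMax_append _ hr0,
            pvMin_append _ hc0, pvMax_append _ hc0]
    have hstepB : (pvStepB dB r c cid).items
        = dB.items.map (fun p => if p.1 == cid then (cid, (q.2.1 ++ [r], q.2.2 ++ [c])) else p) := by
      simp only [pvStepB, PySem.Dict.modify, getDB]
      exact PySem.Dict.items_insert_of_contains _ _ hb
    have hstepA : (pvStepA dA r c cid).items
        = dA.items.map (fun p => if p.1 == cid then
            (cid, (min (pvG q).2.1 r, max (pvG q).2.2.1 r,
                   min (pvG q).2.2.2.1 c, max (pvG q).2.2.2.2 c)) else p) := by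
      simp only [pvStepA, hcont, hb, Bool.true_eq_false, PySem.Dict.modify, getDA]
      exact PySem.Dict.items_insert_of_contains _ _ (hcont.trans hb)
    refine ⟨?_, ?_, ?_⟩
    · rw [hstepA, hstepB, hmap, List.map_map, List.map_map]
      refine List.map_congr_left (fun x _ => ?_)
      by_cases hx : (x.1 == cid) = true
      · have hx' := beq_iff_eq.mp hx
        simp [pvG, hx', pvMin_append _ hr0, pvMax_append _ hr0,
              pvMin_append _ hc0, pvMax_append _ hc0]
      · have hx' : x.1 ≠ cid := by simpa using hx
        simp [pvG, hx']
    · intro p hp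
      rw [hstepB] at hp
      obtain ⟨x, hxmem, hxeq⟩ := List.mem_map.mp hp
      by_cases hx : (x.1 == cid) = true
      · simp only [hx] at hxeq
        subst hxeq; constructor <;> simp
      · simp only [hx] at hxeq
        rw [if_neg (by simp_all)] at hxeq
        subst hxeq; exact hne x hxmem
    · rw [hstepB, List.map_map]
      have : ((fun p : Int × (List Int × List Int) => p.1) ∘
          (fun p => if p.1 == cid then (cid, (q.2.1 ++ [r], q.2.2 ++ [c])) else p))
          = (fun p : Int × (List Int × List Int) => p.1) := by
        funext x
        by_cases hx : (x.1 == cid) = true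
        · simp [beq_iff_eq.mp hx]
        · have hx' : x.1 ≠ cid := by simpa using hx
          simp [hx']
      rw [this]; exact hnd
  · -- new key: both sides append
    have hb' : dB.contains cid = false := by simpa using hb
    have hnotmem : cid ∉ dB.items.map (fun p => p.1) := by
      intro hmem
      obtain ⟨x, hxmem, hxeq⟩ := List.mem_map.mp hmem
      have hcontra : dB.contains cid = true := by
        simp only [PySem.Dict.contains, List.any_eq_true]
        exact ⟨x, hxmem, by simp [hxeq]⟩
      exact hb hcontra
    have hstepB : (pvStepB dB r c cid).items = dB.items ++ [(cid, ([r], [c]))] := by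
      simp only [pvStepB, PySem.Dict.modify, PySem.Dict.getD_of_not_contains _ _ hb']
      exact PySem.Dict.items_insert_of_not_contains _ _ hb'
    have hstepA : (pvStepA dA r c cid).items = dA.items ++ [(cid, (r, r, c, c))] := by
      simp only [pvStepA, hcont, hb']
      exact PySem.Dict.items_insert_of_not_contains _ _ (hcont.trans hb')
    refine ⟨?_, ?_, ?_⟩
    · rw [hstepA, hstepB, hmap, List.map_append]
      simp [pvG, pvMin_single, pvMax_single]
    · intro p hp
      rw [hstepB, List.mem_append] at hp
      rcases hp with hp | hp
      · exact hne p hp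
      · simp only [List.mem_singleton] at hp
        subst hp; constructor <;> simp
    · rw [hstepB, List.map_append]
      rw [List.nodup_append]
      refine ⟨hnd, List.nodup_singleton _, ?_⟩
      intro a ha b hbm
      simp only [List.map_cons, List.map_nil, List.mem_singleton] at hbm
      subst hbm
      exact fun h => hnotmem (h ▸ ha)

theorem pvRow_rel {σ τ : Type} (R : σ → τ → Prop)
    (sA : σ → Int → Int → Int → σ) (sB : τ → Int → Int → Int → τ)
    (hstep : ∀ s t r c cid, R s t → R (sA s r c cid) (sB t r c cid))
    (row : List (Option Int)) (r : Int) : ∀ (c0 : Int) (s : σ) (t : τ), R s t →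
    R ((PySem.List.enumerate row c0).foldl
        (fun s cc => match cc.2 with | none => s | some cid => sA s r cc.1 cid) s)
      ((PySem.List.enumerate row c0).foldl
        (fun t cc => match cc.2 with | none => t | some cid => sB t r cc.1 cid) t) := by
  induction row with
  | nil => intro c0 s t h; exact h
  | cons x xs ih =>
    intro c0 s t h
    rw [PySem.List.enumerate_cons]
    simp only [List.foldl_cons]
    cases x with
    | none => exact ih _ _ _ h
    | some cid => exact ih _ _ _ (hstep _ _ _ _ _ h)

theorem pvGrid_rel {σ τ : Type} (R : σ → τ → Prop)
    (sA : σ → Int → Int → Int → σ) (sB : τ → Int → Int → Int → τ)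
    (hstep : ∀ s t r c cid, R s t → R (sA s r c cid) (sB t r c cid))
    (raw : List (List (Option Int))) : ∀ (r0 : Int) (s : σ) (t : τ), R s t →
    R ((PySem.List.enumerate raw r0).foldl (fun s rc =>
        (PySem.List.enumerate rc.2 0).foldl
          (fun s cc => match cc.2 with | none => s | some cid => sA s rc.1 cc.1 cid) s) s)
      ((PySem.List.enumerate raw r0).foldl (fun t rc =>
        (PySem.List.enumerate rc.2 0).foldl
          (fun t cc => match cc.2 with | none => t | some cid => sB t rc.1 cc.1 cid) t) t) := by
  induction raw with
  | nil => intro r0 s t h; exact h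
  | cons x xs ih =>
    intro r0 s t h
    rw [PySem.List.enumerate_cons]
    simp only [List.foldl_cons]
    exact ih _ _ _ (pvRow_rel R sA sB hstep x r0 0 s t h)

theorem pvPhase2 (LA : List (Int × (Int × Int × Int × Int)))
    (LB : List (Int × (List Int × List Int)))
    (hmap : LA = LB.map pvG) (hnd : (LB.map (fun p => p.1)).Nodup) :
    (LA.foldl (fun info p =>
        info.insert p.1 [("row", p.2.1), ("col", p.2.2.2.1),
                         ("row_span", p.2.2.1 - p.2.1 + 1),
                         ("col_span", p.2.2.2.2 - p.2.2.2.1 + 1)])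
      (PySem.Dict.empty : PySem.Dict Int (List (String × Int)))).items
    = LB.map (fun p =>
        (p.1, [("row", pvMin p.2.1), ("col", pvMin p.2.2),
               ("row_span", pvMax p.2.1 - pvMin p.2.1 + 1),
               ("col_span", pvMax p.2.2 - pvMin p.2.2 + 1)])) := by
  have hndA : (LA.map (fun a => a.1)).Nodup := by
    rw [hmap, List.map_map]
    simpa [Function.comp_def, pvG] using hnd
  have hfresh : ∀ a ∈ LA,
      (PySem.Dict.empty : PySem.Dict Int (List (String × Int))).contains a.1 = false := by
    intro a _; simp [PySem.Dict.empty, PySem.Dict.contains]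
  rw [PySem.Dict.items_foldl_insert_fresh LA (fun p => p.1) _ _ hfresh hndA]
  rw [hmap, List.map_map]
  simp [PySem.Dict.empty, Function.comp_def, pvG]

-- ===== VERDICT (by name: the statement is the Claim_ definition above) =====
theorem calc_spans_and_indices_from_raw_grid_py_spec : Claim_equal_calc_spans_and_indices_from_raw_grid_py := by
  intro raw _
  unfold Spec_calc_spans_and_indices_from_raw_grid_py
  unfold calc_spans_and_indices_from_raw_grid_py calc_spans_and_indices_from_raw_grid_py_alt
  have hbase : pvInv PySem.Dict.empty PySem.Dict.empty := by
    refine ⟨rfl, by simp [PySem.Dict.empty], by simp [PySem.Dict.empty]⟩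
  have hinv := pvGrid_rel pvInv pvStepA pvStepB pvStep_inv raw 0
    PySem.Dict.empty PySem.Dict.empty hbase
  obtain ⟨hmap, hne, hnd⟩ := hinv
  exact pvPhase2 _ _ hmap hnd
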